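-- pv_equiv track=rewrite | github.com/pavel812bigtech/lab2 | AC_huff.py | get_category_ac
-- ===== SOURCE A (Python) =====
-- def get_category_ac(value):
--     """Категория (SIZE) для AC коэффициента"""
--     if value == 0:
--         return 0
--     absv = abs(value)
--     cat = 1
--     while absv >= (1 << cat):
--         cat += 1
--     return cat
-- ===== SOURCE B (Python) =====
-- def get_category_ac(value):
--     """Категория (SIZE) для AC коэффициента"""
--     return abs(value).bit_length()
-- ===== Notes on version B (the rewrite author's own statement) =====
-- stated objective: idiomatic
-- what changed: The doubling while-loop (and the value==0 guard) is replaced by the closed form abs(value).bit_length().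
import Mathlib
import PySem

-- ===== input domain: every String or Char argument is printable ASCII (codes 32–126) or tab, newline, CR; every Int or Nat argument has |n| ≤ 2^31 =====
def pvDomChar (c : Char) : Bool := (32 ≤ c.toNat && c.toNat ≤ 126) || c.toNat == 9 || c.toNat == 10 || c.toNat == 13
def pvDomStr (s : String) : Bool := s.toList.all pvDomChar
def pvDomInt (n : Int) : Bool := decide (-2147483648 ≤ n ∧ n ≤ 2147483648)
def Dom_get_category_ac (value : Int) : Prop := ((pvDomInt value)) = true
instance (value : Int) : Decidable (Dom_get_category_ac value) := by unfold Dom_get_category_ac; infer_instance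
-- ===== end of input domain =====

-- B replaces A's doubling while-loop (and the value==0 guard) with the closed form
-- abs(value).bit_length() — more idiomatic; same value for every integer input.

-- ===== PORT A =====
-- the while loop: 'while absv >= (1 << cat): cat += 1'
def pvLoopA (absv cat : Nat) : Nat :=
  if 1 <<< cat ≤ absv then pvLoopA absv (cat + 1) else cat
termination_by absv + 1 - 2 ^ cat
decreasing_by
  have h2 : 2 ^ cat < 2 ^ (cat + 1) := Nat.pow_lt_pow_succ (by norm_num)
  simp only [Nat.shiftLeft_eq, one_mul] at *
  omega

def get_category_ac (value : Int) : Int :=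
  if value = 0 then 0
  else (pvLoopA value.natAbs 1 : Int)

-- ===== PORT B =====
-- abs(value).bit_length() : Nat.size is the bit length
def get_category_ac_alt (value : Int) : Int := (value.natAbs.size : Int)

-- ===== PRECONDITION & SPEC =====
def Spec_get_category_ac (value : Int) (out : Int) : Prop := out = get_category_ac_alt value
instance (value : Int) (out : Int) : Decidable (Spec_get_category_ac value out) := by unfold Spec_get_category_ac; infer_instance

-- ===== CLAIM (what is proved, stated in full; the proofs are below) =====
def Claim_equal_get_category_ac : Prop := ∀ (value : Int), Dom_get_category_ac value → Spec_get_category_ac value (get_category_ac value)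

-- ===== LEMMAS AND PROOFS =====
theorem pvLoopA_eq_size (absv cat : Nat) (hc : 0 < cat) (hlo : 2 ^ (cat - 1) ≤ absv) :
    pvLoopA absv cat = absv.size := by
  fun_induction pvLoopA absv cat with
  | case1 cat h ih =>
    simp only [Nat.shiftLeft_eq, one_mul] at h
    exact ih (by omega) (by simpa using h)
  | case2 cat h =>
    simp only [Nat.shiftLeft_eq, one_mul, not_le] at h
    have hle : absv.size ≤ cat := Nat.size_le.mpr h
    have hgt : ¬ (absv.size ≤ cat - 1) :=
      fun hx => absurd (Nat.size_le.mp hx) (Nat.not_lt.mpr hlo)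
    omega

-- ===== VERDICT (by name: the statement is the Claim_ definition above) =====
theorem get_category_ac_spec : Claim_equal_get_category_ac := by
  intro value _
  unfold Spec_get_category_ac get_category_ac get_category_ac_alt
  by_cases h : value = 0
  · simp [h, Nat.size_zero]
  · rw [if_neg h, pvLoopA_eq_size _ 1 (by omega) (by simp; omega)]
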